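-- pv_equiv track=rewrite | github.com/checopa/CC3101-Discretas | Tarea2/Tarea2CEC.py | estaPal
-- ===== SOURCE A (Python) =====
-- def estaPal(s):
--     if len(s)==0:
--         return True
--     if len(s)==1 and s=="a":
--         return True
--     if len(s)==2 and s=="sk":
--         return True
--     if len(s)==3 and s=="jaj":
--         return True
--     if s[0]=="a":
--         return estaPal(s[1:])
--     if (len(s)>1) and s[:2]=="sk":
--         return estaPal(s[2:])
--     if  (len(s)>2) and s[:3]=="jaj":
--         return estaPal(s[3:])
--     return False
-- ===== SOURCE B (Python) =====
-- def estaPal(s):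
--     # Single left-to-right index pass: dispatch on the current character,
--     # consume the matching token (a / sk / jaj) or fail. O(n), no slicing recursion.
--     i = 0
--     n = len(s)
--     while i < n:
--         c = s[i]
--         if c == 'a':
--             i += 1
--         elif c == 's' and s.startswith('sk', i):
--             i += 2
--         elif c == 'j' and s.startswith('jaj', i):
--             i += 3
--         else:
--             return False
--     return True
-- ===== Notes on version B (the rewrite author's own statement) =====
-- stated objective: faster
-- what changed: Replaced the recursive slicing decomposition (each step copies the remaining suffix) by a single iterative index-pointer pass dispatching on the current character, consuming one token per step.
import Mathlib
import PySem

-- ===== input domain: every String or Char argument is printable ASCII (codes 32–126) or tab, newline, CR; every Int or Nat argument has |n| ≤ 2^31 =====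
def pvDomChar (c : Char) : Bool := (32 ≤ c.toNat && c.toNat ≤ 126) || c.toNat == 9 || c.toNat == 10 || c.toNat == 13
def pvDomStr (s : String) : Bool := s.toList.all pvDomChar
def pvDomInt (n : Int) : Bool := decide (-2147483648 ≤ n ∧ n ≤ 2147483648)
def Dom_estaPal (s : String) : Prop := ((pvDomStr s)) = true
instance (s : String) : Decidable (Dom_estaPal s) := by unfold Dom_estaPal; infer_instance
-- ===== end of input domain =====

-- B replaces A's recursive slicing decomposition by a single index-pointer pass dispatching on the current character (objective: faster).

-- ===== PORT A =====
-- A's recursion, transliterated over the character list; s[k:] is List.drop k, s[:k] is List.take k,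
-- and the equality tests against the literal tokens keep A's length-guarded form.
def pvEstaPalA (l : List Char) : Bool :=
  if l.length = 0 then true
  else if l.length = 1 ∧ l = ['a'] then true
  else if l.length = 2 ∧ l = ['s', 'k'] then true
  else if l.length = 3 ∧ l = ['j', 'a', 'j'] then true
  else if l.take 1 = ['a'] then pvEstaPalA (l.drop 1)
  else if l.length > 1 ∧ l.take 2 = ['s', 'k'] then pvEstaPalA (l.drop 2)
  else if l.length > 2 ∧ l.take 3 = ['j', 'a', 'j'] then pvEstaPalA (l.drop 3)
  else false
termination_by l.length
decreasing_by all_goals simp [List.length_drop]; omega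

def estaPal (s : String) : Bool := pvEstaPalA s.toList

-- ===== PORT B =====
-- B's while loop over the index pointer: the unprocessed suffix, one elif chain on its first
-- character (s.startswith('sk', i) with s[i] = 's' is "the next character is 'k'", likewise for 'jaj').
def pvEstaPalB (l : List Char) : Bool :=
  match l with
  | [] => true
  | c :: r =>
    if c = 'a' then pvEstaPalB r
    else if c = 's' ∧ r.take 1 = ['k'] then pvEstaPalB (r.drop 1)
    else if c = 'j' ∧ r.take 2 = ['a', 'j'] then pvEstaPalB (r.drop 2)
    else false
termination_by l.length
decreasing_by all_goals simp [List.length_drop]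

def estaPal_alt (s : String) : Bool := pvEstaPalB s.toList

-- ===== PRECONDITION & SPEC =====
def Spec_estaPal (s : String) (out : Bool) : Prop := out = estaPal_alt s
instance (s : String) (out : Bool) : Decidable (Spec_estaPal s out) := by unfold Spec_estaPal; infer_instance

-- ===== CLAIM (what is proved, stated in full; the proofs are below) =====
def Claim_equal_estaPal : Prop := ∀ (s : String), Dom_estaPal s → Spec_estaPal s (estaPal s)

-- ===== LEMMAS AND PROOFS =====
-- One-step characterisation of A's recursion by the shape of the head.
theorem stepA_nil : pvEstaPalA [] = true := by rw [pvEstaPalA]; simp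

theorem stepA_a (r : List Char) : pvEstaPalA ('a' :: r) = pvEstaPalA r := by
  rw [pvEstaPalA]
  rcases r with _ | ⟨c2, r2⟩
  · simp [stepA_nil]
  · simp

theorem stepA_sk (r : List Char) : pvEstaPalA ('s' :: 'k' :: r) = pvEstaPalA r := by
  rw [pvEstaPalA]
  rcases r with _ | ⟨c3, r3⟩
  · simp [stepA_nil]
  · simp

theorem stepA_jaj (r : List Char) : pvEstaPalA ('j' :: 'a' :: 'j' :: r) = pvEstaPalA r := by
  rw [pvEstaPalA]
  rcases r with _ | ⟨c4, r4⟩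
  · simp [stepA_nil]
  · simp

theorem stepA_bad (c : Char) (r : List Char) (h1 : c ≠ 'a') (h2 : c ≠ 's') (h3 : c ≠ 'j') :
    pvEstaPalA (c :: r) = false := by
  rw [pvEstaPalA]; simp [h1, h2, h3]

theorem stepA_s_nil : pvEstaPalA ['s'] = false := by rw [pvEstaPalA]; simp

theorem stepA_s_bad (c : Char) (r : List Char) (h : c ≠ 'k') :
    pvEstaPalA ('s' :: c :: r) = false := by
  rw [pvEstaPalA]; simp [h]

theorem stepA_j_nil : pvEstaPalA ['j'] = false := by rw [pvEstaPalA]; simp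

theorem stepA_j_one (c : Char) : pvEstaPalA ['j', c] = false := by rw [pvEstaPalA]; simp

theorem stepA_j_bad (x y : Char) (r : List Char) (h : ¬(x = 'a' ∧ y = 'j')) :
    pvEstaPalA ('j' :: x :: y :: r) = false := by
  rw [pvEstaPalA]
  rcases Decidable.not_and_iff_not_or_not.mp h with h | h <;> simp [h]

theorem pvEstaPal_eq : ∀ (n : Nat) (l : List Char), l.length ≤ n → pvEstaPalA l = pvEstaPalB l := by
  intro n
  induction n with
  | zero =>
    intro l hl
    have h : l = [] := List.eq_nil_of_length_eq_zero (Nat.le_zero.mp hl)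
    subst h; rw [stepA_nil, pvEstaPalB]
  | succ n ih =>
    intro l hl
    rcases l with _ | ⟨c, r⟩
    · rw [stepA_nil, pvEstaPalB]
    · have hr : r.length ≤ n := by simp at hl; omega
      rw [pvEstaPalB]
      by_cases hca : c = 'a'
      · subst hca
        rw [if_pos rfl, stepA_a]
        exact ih r hr
      · rw [if_neg hca]
        by_cases hcs : c = 's'
        · subst hcs
          rcases r with _ | ⟨c2, r2⟩
          · simp [stepA_s_nil]
          · by_cases hk : c2 = 'k'
            · subst hk
              rw [if_pos ⟨rfl, by simp⟩]
              simp only [List.drop_succ_cons, List.drop_zero]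
              rw [stepA_sk]
              exact ih r2 (by simp at hr ⊢; omega)
            · rw [if_neg (by simp [hk]), if_neg (by simp)]
              exact stepA_s_bad c2 r2 hk
        · by_cases hcj : c = 'j'
          · subst hcj
            rcases r with _ | ⟨x, r2⟩
            · simp [stepA_j_nil, hcs]
            · rcases r2 with _ | ⟨y, r3⟩
              · simp [stepA_j_one, hcs]
              · by_cases hxy : x = 'a' ∧ y = 'j'
                · obtain ⟨hx, hy⟩ := hxy
                  subst hx; subst hy
                  rw [if_neg (by simp [hcs]), if_pos ⟨rfl, by simp⟩]
                  simp only [List.drop_succ_cons, List.drop_zero]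
                  rw [stepA_jaj]
                  exact ih r3 (by simp at hr ⊢; omega)
                · rw [if_neg (by simp [hcs]),
                      if_neg (by rintro ⟨-, ht⟩; simp at ht; exact hxy ⟨ht.1, ht.2⟩)]
                  exact stepA_j_bad x y r3 hxy
          · rw [if_neg (by simp [hcs]), if_neg (by simp [hcj])]
            exact stepA_bad c r hca hcs hcj

-- ===== VERDICT (by name: the statement is the Claim_ definition above) =====
theorem estaPal_spec : Claim_equal_estaPal := by
  intro s _
  unfold Spec_estaPal estaPal estaPal_alt
  exact pvEstaPal_eq s.toList.length s.toList le_rfl
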